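-- pv_equiv track=rewrite | github.com/RazLandau/pybryt | max_even_seq/subs/2017B/134.py | max_even_seq
-- ===== SOURCE A (Python) =====
-- def max_even_seq(n):
--     max_even = 0
--     temp=0
--     while n>0:
--         if(n%10)%2!=0:
--             temp=0
--         else:
--             temp = temp+1
--             if temp>max_even:
--                 max_even=temp
--         n=n//10
--     return(max_even)
-- ===== SOURCE B (Python) =====
-- def _runs(digs):
--     # split digs into maximal runs of equal parity, as (parity, length) pairs
--     if not digs:
--         return []
--     rest = _runs(digs[1:])
--     p = digs[0] % 2
--     if rest and rest[0][0] == p: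
--         return [(p, rest[0][1] + 1)] + rest[1:]
--     return [(p, 1)] + rest
--
--
-- def max_even_seq(n):
--     digs = []
--     while n > 0:
--         n, d = divmod(n, 10)
--         digs.append(d)
--     return max([c for p, c in _runs(digs) if p == 0], default=0)
-- ===== Notes on version B (the rewrite author's own statement) =====
-- stated objective: alternative
-- what changed: B materializes the digit list, recursively splits it into maximal (parity, run-length) groups, and reduces with max(..., default=0), instead of A's single while-loop with a running counter and running maximum.
import Mathlib
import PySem

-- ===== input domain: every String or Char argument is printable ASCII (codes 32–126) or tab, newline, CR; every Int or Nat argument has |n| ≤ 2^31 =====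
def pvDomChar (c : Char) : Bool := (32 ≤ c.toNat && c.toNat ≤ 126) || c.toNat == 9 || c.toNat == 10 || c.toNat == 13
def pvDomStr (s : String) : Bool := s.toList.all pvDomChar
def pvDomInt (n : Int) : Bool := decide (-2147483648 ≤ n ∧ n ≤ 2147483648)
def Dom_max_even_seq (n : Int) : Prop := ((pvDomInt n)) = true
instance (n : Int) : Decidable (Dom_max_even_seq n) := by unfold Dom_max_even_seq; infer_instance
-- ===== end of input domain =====

-- B replaces A's running-counter-and-running-max loop by materializing the digit list, grouping it
-- into maximal (parity, run-length) pairs and reducing with max(..., default=0): same values, a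
-- differently decomposed algorithm (objective: alternative).

-- ===== PORT A =====
-- A's while loop: state (temp, max_even), n shrinks by n//10.
def maxEvenSeqLoop (n temp max_even : Int) : Int :=
  if h : n > 0 then
    if PySem.Int.mod (PySem.Int.mod n 10) 2 ≠ 0 then
      maxEvenSeqLoop (PySem.Int.floordiv n 10) 0 max_even
    else
      let temp' := temp + 1
      let max_even' := if temp' > max_even then temp' else max_even
      maxEvenSeqLoop (PySem.Int.floordiv n 10) temp' max_even'
  else
    max_even
termination_by n.toNat
decreasing_by
  all_goals
    have hd : PySem.Int.floordiv n 10 = n / 10 := PySem.Int.floordiv_eq_ediv_of_pos (by omega)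
    rw [hd]; omega

def max_even_seq (n : Int) : Int := maxEvenSeqLoop n 0 0

-- ===== PORT B =====
-- B's digit-collecting while loop: digs = [n%10, (n//10)%10, ...] (least significant first).
def digitsB (n : Int) : List Int :=
  if _h : n > 0 then PySem.Int.mod n 10 :: digitsB (PySem.Int.floordiv n 10) else []
termination_by n.toNat
decreasing_by
  have hd : PySem.Int.floordiv n 10 = n / 10 := PySem.Int.floordiv_eq_ediv_of_pos (by omega)
  rw [hd]; omega

-- B's _runs: maximal (parity, length) groups of the digit list.
def runsB : List Int → List (Int × Int)
  | [] => []
  | d :: t =>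
    let rest := runsB t
    match rest with
    | (p, c) :: tl =>
      if PySem.Int.mod d 2 = p then (p, c + 1) :: tl
      else (PySem.Int.mod d 2, 1) :: (p, c) :: tl
    | [] => [(PySem.Int.mod d 2, 1)]

def max_even_seq_alt (n : Int) : Int :=
  PySem.List.maxD (((runsB (digitsB n)).filter (fun pc => pc.1 == 0)).map Prod.snd)
    (fun y => y) 0

-- ===== PRECONDITION & SPEC =====
def Spec_max_even_seq (n : Int) (out : Int) : Prop := out = max_even_seq_alt n
instance (n : Int) (out : Int) : Decidable (Spec_max_even_seq n out) := by unfold Spec_max_even_seq; infer_instance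

-- ===== CLAIM (what is proved, stated in full; the proofs are below) =====
def Claim_equal_max_even_seq : Prop := ∀ (n : Int), Dom_max_even_seq n → Spec_max_even_seq n (max_even_seq n)

-- ===== LEMMAS AND PROOFS =====

-- A's loop as a fold over the digit list (helper for the proof only).
def foldA : List Int → Int → Int → Int
  | [], _, best => best
  | d :: t, temp, best =>
    if PySem.Int.mod d 2 ≠ 0 then foldA t 0 best
    else foldA t (temp + 1) (if temp + 1 > best then temp + 1 else best)

-- the "best extension of the current run" quantity A tracks.
def carryF : List Int → Int → Int
  | [], temp => temp
  | d :: t, temp =>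
    if PySem.Int.mod d 2 = 0 then carryF t (temp + 1) else max temp (carryF t 0)

-- B's reduction: max of the even-run lengths, 0 if none.
def mEven (r : List (Int × Int)) : Int :=
  ((r.filter (fun pc => pc.1 == 0)).map Prod.snd).foldl max 0

theorem loop_eq_foldA (n temp best : Int) :
    maxEvenSeqLoop n temp best = foldA (digitsB n) temp best := by
  by_cases h : n > 0
  · rw [maxEvenSeqLoop, digitsB, dif_pos h, dif_pos h]
    simp only [foldA]
    split_ifs with ho hb
    · exact loop_eq_foldA _ 0 best
    · exact loop_eq_foldA _ (temp + 1) _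
    · exact loop_eq_foldA _ (temp + 1) _
  · rw [maxEvenSeqLoop, digitsB, dif_neg h, dif_neg h]; rfl
termination_by n.toNat
decreasing_by
  all_goals
    have hd : PySem.Int.floordiv n 10 = n / 10 := PySem.Int.floordiv_eq_ediv_of_pos (by omega)
    rw [hd]; omega

theorem le_carryF (l : List Int) (temp : Int) : temp ≤ carryF l temp := by
  induction l generalizing temp with
  | nil => exact le_refl _
  | cons d t ih =>
    simp only [carryF]
    split_ifs
    · exact le_trans (by omega) (ih (temp + 1))
    · exact le_max_left _ _

theorem foldA_eq_max (l : List Int) (temp best : Int) (h0 : 0 ≤ temp) (hb : temp ≤ best) :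
    foldA l temp best = max best (carryF l temp) := by
  induction l generalizing temp best with
  | nil => simp [foldA, carryF, max_eq_left hb]
  | cons d t ih =>
    simp only [foldA, carryF]
    by_cases ho : PySem.Int.mod d 2 = 0
    · rw [if_neg (by simpa using ho), if_pos ho]
      have hif : (if temp + 1 > best then temp + 1 else best) = max best (temp + 1) := by
        rw [max_def]; split_ifs <;> omega
      rw [hif, ih (temp + 1) _ (by omega) (le_max_right _ _)]
      rw [max_assoc, max_eq_right (le_carryF t (temp + 1))]
    · rw [if_pos (by simpa using ho), if_neg ho]
      rw [ih 0 best le_rfl (le_trans h0 hb)]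
      rw [← max_assoc, max_eq_left hb]

theorem foldl_max_shift (l : List Int) (a b : Int) :
    l.foldl max (max a b) = max a (l.foldl max b) := by
  induction l generalizing b with
  | nil => rfl
  | cons c t ih => simpa only [List.foldl, max_assoc] using ih (max b c)

theorem mEven_nonneg (r : List (Int × Int)) : 0 ≤ mEven r := by
  unfold mEven
  exact (PySem.List.le_foldl_max _ 0).1

theorem mEven_cons_zero (c : Int) (tl : List (Int × Int)) :
    mEven ((0, c) :: tl) = max c (mEven tl) := by
  simp only [mEven, List.filter, List.map, List.foldl, BEq.rfl]
  rw [max_comm 0 c, foldl_max_shift]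

theorem mEven_cons_ne (p c : Int) (tl : List (Int × Int)) (hp : p ≠ 0) :
    mEven ((p, c) :: tl) = mEven tl := by
  simp [mEven, hp]

theorem mod_two_cases (d : Int) : PySem.Int.mod d 2 = 0 ∨ PySem.Int.mod d 2 = 1 := by
  have h1 := PySem.Int.mod_nonneg d (b := 2) (by omega)
  have h2 := PySem.Int.mod_lt d (b := 2) (by omega)
  omega

theorem runsB_head_key (l : List Int) (p c : Int) (tl : List (Int × Int))
    (h : runsB l = (p, c) :: tl) : p = 0 ∨ p = 1 := by
  induction l generalizing p c tl with
  | nil => simp [runsB] at h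
  | cons d t ih =>
    simp only [runsB] at h
    cases hr : runsB t with
    | nil => rw [hr] at h; simp only [List.cons.injEq, Prod.mk.injEq] at h; rw [← h.1.1]; exact mod_two_cases d
    | cons hd tl' =>
      rcases hd with ⟨p', c'⟩
      rw [hr] at h
      dsimp only at h
      split_ifs at h with hm
      · simp only [List.cons.injEq, Prod.mk.injEq] at h
        rw [← h.1.1]; exact ih p' c' tl' hr
      · simp only [List.cons.injEq, Prod.mk.injEq] at h
        rw [← h.1.1]; exact mod_two_cases d

theorem runsB_snd_pos (l : List Int) (p c : Int) (h : (p, c) ∈ runsB l) : 1 ≤ c := by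
  induction l generalizing p c with
  | nil => simp [runsB] at h
  | cons d t ih =>
    simp only [runsB] at h
    cases hr : runsB t with
    | nil => rw [hr] at h; simp at h; omega
    | cons hd tl =>
      rcases hd with ⟨p', c'⟩
      rw [hr] at h
      dsimp only at h
      split_ifs at h with hm
      · rcases List.mem_cons.1 h with h1 | h1
        · have : 1 ≤ c' := ih p' c' (by rw [hr]; exact List.mem_cons_self)
          simp only [Prod.mk.injEq] at h1; omega
        · exact ih p c (by rw [hr]; exact List.mem_cons_of_mem _ h1)
      · rcases List.mem_cons.1 h with h1 | h1
        · simp only [Prod.mk.injEq] at h1; omega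
        · exact ih p c (by rw [hr]; exact h1)

theorem carryF_char (l : List Int) (temp : Int) (h0 : 0 ≤ temp) :
    carryF l temp =
      match runsB l with
      | [] => temp
      | (p, c) :: tl => if p = 0 then max (temp + c) (mEven tl) else max temp (mEven ((p, c) :: tl)) := by
  induction l generalizing temp with
  | nil => simp [carryF, runsB]
  | cons d t ih =>
    have hcar : carryF (d :: t) temp =
        if PySem.Int.mod d 2 = 0 then carryF t (temp + 1) else max temp (carryF t 0) := rfl
    rw [hcar]
    by_cases he : PySem.Int.mod d 2 = 0
    · rw [if_pos he, ih (temp + 1) (by omega)]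
      cases hr : runsB t with
      | nil =>
        have hrd : runsB (d :: t) = [(PySem.Int.mod d 2, 1)] := by simp only [runsB, hr]
        rw [hrd, he]
        dsimp only
        rw [if_pos rfl]
        have : mEven [] = 0 := rfl
        rw [this, max_eq_left (by omega)]
      | cons hd tl =>
        rcases hd with ⟨p, c⟩
        by_cases hp : p = 0
        · subst hp
          have hrd : runsB (d :: t) = (0, c + 1) :: tl := by
            simp only [runsB, hr]; rw [if_pos (by rw [he])]
          rw [hrd]
          dsimp only
          rw [if_pos rfl, if_pos rfl]
          ring_nf
        · have hrd : runsB (d :: t) = (PySem.Int.mod d 2, 1) :: (p, c) :: tl := by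
            simp only [runsB, hr]; rw [if_neg (by rw [he]; exact fun hh => hp hh.symm)]
          rw [hrd, he]
          dsimp only
          rw [if_neg hp, if_pos rfl]
    · rw [if_neg he, ih 0 le_rfl]
      cases hr : runsB t with
      | nil =>
        have hrd : runsB (d :: t) = [(PySem.Int.mod d 2, 1)] := by simp only [runsB, hr]
        rw [hrd]
        dsimp only
        rw [if_neg he, mEven_cons_ne _ _ _ he]
        rfl
      | cons hd tl =>
        rcases hd with ⟨p, c⟩
        by_cases hp : p = 0
        · subst hp
          have hrd : runsB (d :: t) = (PySem.Int.mod d 2, 1) :: (0, c) :: tl := by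
            simp only [runsB, hr]; rw [if_neg he]
          rw [hrd]
          dsimp only
          rw [if_pos rfl, if_neg he, mEven_cons_ne _ _ _ he, mEven_cons_zero, zero_add]
        · have hp1 : p = 1 := by
            rcases runsB_head_key t p c tl hr with h | h
            · exact absurd h hp
            · exact h
          have hd1 : PySem.Int.mod d 2 = 1 := by
            rcases mod_two_cases d with h | h
            · exact absurd h he
            · exact h
          have hrd : runsB (d :: t) = (p, c + 1) :: tl := by
            simp only [runsB, hr]; rw [if_pos (by rw [hd1, hp1])]
          rw [hrd]
          dsimp only
          rw [if_neg hp, if_neg hp]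
          rw [mEven_cons_ne _ _ _ hp, mEven_cons_ne _ _ _ hp,
            max_eq_right (mEven_nonneg tl)]

theorem carryF_zero_eq_mEven (l : List Int) : carryF l 0 = mEven (runsB l) := by
  rw [carryF_char l 0 le_rfl]
  cases hr : runsB l with
  | nil => simp [mEven]
  | cons hd tl =>
    rcases hd with ⟨p, c⟩
    dsimp only
    by_cases hp : p = 0
    · subst hp
      rw [if_pos rfl, zero_add, mEven_cons_zero]
    · rw [if_neg hp, max_eq_right (mEven_nonneg _)]

theorem maxD_eq_foldl (xs : List Int) (h : ∀ x ∈ xs, 0 ≤ x) :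
    PySem.List.maxD xs (fun y => y) 0 = xs.foldl max 0 := by
  cases xs with
  | nil => rfl
  | cons x t =>
    have := PySem.List.max?_id_cons x t
    simp only [PySem.List.maxD, this, Option.getD_some, List.foldl]
    rw [max_eq_right (h x List.mem_cons_self)]

-- ===== VERDICT (by name: the statement is the Claim_ definition above) =====
theorem max_even_seq_spec : Claim_equal_max_even_seq := by
  intro n _
  show max_even_seq n = max_even_seq_alt n
  rw [max_even_seq, max_even_seq_alt, loop_eq_foldA,
    foldA_eq_max _ 0 0 le_rfl le_rfl, max_eq_right (le_carryF _ 0),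
    carryF_zero_eq_mEven,
    maxD_eq_foldl _ (by
      intro x hx
      rcases List.mem_map.1 hx with ⟨⟨p, c⟩, hmem, hxc⟩
      have := runsB_snd_pos (digitsB n) p c (List.mem_of_mem_filter hmem)
      omega)]
  rfl
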